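-- pv_equiv track=rewrite | github.com/maksymhonchar/aco2022 | day_6/p1/solution.py | search
-- ===== SOURCE A (Python) =====
-- from typing import Generator, Optional
--
-- def search(
--     datastream: str
-- ) -> Optional[int]:
--     marker_len = 4
--     for char_idx in range(len(datastream)):
--         marker = datastream[char_idx:char_idx+marker_len]
--         marker_chars_unique = len(set(marker)) == marker_len
--         if marker_chars_unique:
--             return char_idx + marker_len
--     return None
-- ===== SOURCE B (Python) =====
-- def search(datastream):
--     marker_len = 4
--     window = []  # longest run of pairwise-distinct chars ending just before the current one
--     for i, c in enumerate(datastream):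
--         if c in window:
--             window = window[window.index(c) + 1:]
--         window.append(c)
--         if len(window) == marker_len:
--             return i + 1
--     return None
-- ===== Notes on version B (the rewrite author's own statement) =====
-- stated objective: alternative
-- what changed: Replaces the per-index rebuild of a 4-char slice and its set with a single sliding-window pass that keeps the current run of pairwise-distinct characters as a small list and cuts it just past a repeated character.
import Mathlib
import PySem

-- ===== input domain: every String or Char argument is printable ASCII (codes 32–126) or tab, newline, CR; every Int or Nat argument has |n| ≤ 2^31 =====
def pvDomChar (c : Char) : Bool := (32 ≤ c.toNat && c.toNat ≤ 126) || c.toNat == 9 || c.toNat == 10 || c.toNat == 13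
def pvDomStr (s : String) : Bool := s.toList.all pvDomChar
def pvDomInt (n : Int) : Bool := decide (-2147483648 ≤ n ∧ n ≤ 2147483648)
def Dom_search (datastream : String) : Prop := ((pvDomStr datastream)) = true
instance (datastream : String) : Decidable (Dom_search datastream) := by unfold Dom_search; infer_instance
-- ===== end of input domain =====

-- B replaces A's per-index slice-and-set scan by a single sliding-window pass
-- (the current run of pairwise-distinct chars is kept as a small list and cut
-- just past a repeated char); same return value, alternative algorithm.

-- ===== PORT A =====
-- literal transliteration of A: for char_idx in range(len(datastream)):
--   marker = datastream[char_idx:char_idx+4]; if len(set(marker)) == 4: return char_idx + 4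
def searchGo (datastream : String) : List Int → Option Int
  | [] => none
  | charIdx :: rest =>
    let marker := PySem.Str.slice datastream (some charIdx) (some (charIdx + 4))
    let markerCharsUnique := PySem.Set.len (PySem.Set.ofList marker.toList) == 4
    if markerCharsUnique then some (charIdx + 4) else searchGo datastream rest

def search (datastream : String) : Option Int :=
  searchGo datastream (PySem.List.pyRange 0 (PySem.Str.len datastream) 1)

-- ===== PORT B =====
-- literal transliteration of Source B: for i, c in enumerate(datastream):
--   if c in window: window = window[window.index(c)+1:]
--   window.append(c);  if len(window) == 4: return i + 1
def searchAltGo : List (Int × Char) → List Char → Option Int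
  | [], _ => none
  | (i, c) :: rest, window =>
    let window1 := if window.contains c then
        PySem.List.slice window (some (((PySem.List.index? window c).getD 0 : Int) + 1)) none
      else window
    let window2 := window1 ++ [c]
    if window2.length = 4 then some (i + 1) else searchAltGo rest window2

def search_alt (datastream : String) : Option Int :=
  searchAltGo (PySem.List.enumerate datastream.toList) []

-- ===== PRECONDITION & SPEC =====
def Spec_search (datastream : String) (out : Option Int) : Prop := out = search_alt datastream
instance (datastream : String) (out : Option Int) : Decidable (Spec_search datastream out) := by unfold Spec_search; infer_instance

-- ===== CLAIM (what is proved, stated in full; the proofs are below) =====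
def Claim_equal_search : Prop := ∀ (datastream : String), Dom_search datastream → Spec_search datastream (search datastream)

-- ===== LEMMAS AND PROOFS =====

-- reference spec: ok4 l says the first 4 chars of l exist and are pairwise distinct;
-- firstWin l is the index of the first such window.
def ok4 : List Char → Bool
  | a :: b :: c :: d :: _ => a ≠ b && a ≠ c && a ≠ d && b ≠ c && b ≠ d && c ≠ d
  | _ => false

def firstWin : List Char → Option Nat
  | [] => none
  | a :: rest => if ok4 (a :: rest) then some 0 else (firstWin rest).map (· + 1)

lemma firstWin_cons_false {x : Char} {l : List Char} (h : ok4 (x :: l) = false) :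
    firstWin (x :: l) = (firstWin l).map (· + 1) := by
  simp [firstWin, h]

-- A's per-window test len(set(marker)) == 4 is exactly ok4 of the remaining stream
lemma cond_eq (l : List Char) :
    (PySem.Set.len (PySem.Set.ofList (l.take 4)) == (4 : Int)) = ok4 l := by
  rcases l with _ | ⟨a, _ | ⟨b, _ | ⟨c, _ | ⟨d, t⟩⟩⟩⟩ <;>
    · simp only [List.take, PySem.Set.len, PySem.Set.ofList, PySem.Set.add, PySem.Set.empty,
        List.foldl, ok4]
      try split_ifs <;> simp_all <;> tauto
      try simp

lemma firstWin_short : ∀ {l : List Char}, l.length ≤ 3 → firstWin l = none := by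
  intro l h
  rcases l with _ | ⟨a, _ | ⟨b, _ | ⟨c, _ | ⟨d, t⟩⟩⟩⟩ <;> simp_all [firstWin, ok4] <;> omega

-- A's loop over range(len(s)) computes firstWin
lemma searchGo_eq (s : String) : ∀ (fuel i : Nat), s.toList.length ≤ i + fuel →
    searchGo s (PySem.List.pyRange (i : Int) (PySem.Str.len s) 1) =
      (firstWin (s.toList.drop i)).map (fun k => ((i + k : Nat) : Int) + 4) := by
  intro fuel
  induction fuel with
  | zero =>
    intro i h
    rw [PySem.Str.len_eq, PySem.List.pyRange_one_eq_nil (by exact_mod_cast by omega),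
      List.drop_eq_nil_of_le (by omega)]
    rfl
  | succ fuel ih =>
    intro i h
    by_cases hi : i < s.toList.length
    · rw [PySem.Str.len_eq, PySem.List.pyRange_one_cons (by exact_mod_cast hi)]
      have hsl : (PySem.Str.slice s (some (i : Int)) (some ((i : Int) + 4))).toList
          = ((s.toList.drop i).take 4) := by
        have := PySem.List.slice_natCast_add s.toList i 4
        simp [PySem.Str.slice]
        exact_mod_cast this
      have hcond : (PySem.Set.len (PySem.Set.ofList
          (PySem.Str.slice s (some (i : Int)) (some ((i : Int) + 4))).toList) == (4 : Int))
          = ok4 (s.toList.drop i) := by rw [hsl, cond_eq]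
      by_cases hok : ok4 (s.toList.drop i) = true
      · simp only [searchGo, hcond, hok, if_true]
        have hfw : firstWin (s.toList.drop i) = some 0 := by
          rw [List.drop_eq_getElem_cons hi]
          simp [firstWin, hok]
        rw [hfw]
        simp
      · have hok' : ok4 (s.toList[i] :: s.toList.drop (i+1)) = false := by
          rw [← List.drop_eq_getElem_cons hi]; simpa using hok
        simp only [searchGo, hcond, hok, if_false, Bool.false_eq_true]
        rw [List.drop_eq_getElem_cons hi, firstWin_cons_false hok']
        have hc : ((i : Int) + 1) = ((i + 1 : Nat) : Int) := by push_cast; ring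
        rw [hc, ← PySem.Str.len_eq, ih (i+1) (by omega)]
        cases firstWin (s.toList.drop (i+1)) <;> simp
        ring
    · rw [PySem.Str.len_eq, PySem.List.pyRange_one_eq_nil (by exact_mod_cast by omega),
        List.drop_eq_nil_of_le (by omega)]
      rfl

-- every 4-window that starts at or before the first copy of c also contains the
-- second copy, so firstWin skips past the first copy
lemma skipLem (u v : List Char) (c : Char) (t : List Char) (h : u.length + v.length ≤ 2) :
    firstWin (u ++ (c :: (v ++ (c :: t)))) =
      (firstWin (v ++ c :: t)).map (· + (u.length + 1)) := by
  have okcc : ∀ t' : List Char, ok4 (c :: c :: t') = false := by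
    intro t'; rcases t' with _ | ⟨z, _ | ⟨w, t''⟩⟩ <;> simp [ok4]
  have okcxc : ∀ (x : Char) (t' : List Char), ok4 (c :: x :: c :: t') = false := by
    intro x t'; rcases t' with _ | ⟨z, t''⟩ <;> simp [ok4]
  have okacc : ∀ (a : Char) (t' : List Char), ok4 (a :: c :: c :: t') = false := by
    intro a t'; rcases t' with _ | ⟨z, t''⟩ <;> simp [ok4]
  rcases u with _ | ⟨a, _ | ⟨b, _ | ⟨x, u'⟩⟩⟩ <;>
      rcases v with _ | ⟨p, _ | ⟨q, _ | ⟨r, v'⟩⟩⟩ <;>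
    simp only [List.length_cons, List.length_nil, List.cons_append, List.nil_append] at h ⊢ <;>
    try omega
  case _ =>
    rw [firstWin_cons_false (okcc _)]
  case _ =>
    rw [firstWin_cons_false (okcxc _ _)]
  case _ =>
    rw [firstWin_cons_false (by simp [ok4])]
  case _ =>
    rw [firstWin_cons_false (okacc _ _), firstWin_cons_false (okcc _)]
    cases firstWin (c :: t) <;> simp
  case _ =>
    rw [firstWin_cons_false (by simp [ok4]), firstWin_cons_false (okcxc _ _)]
    cases firstWin (p :: c :: t) <;> simp
  case _ =>
    rw [firstWin_cons_false (by simp [ok4]), firstWin_cons_false (okacc _ _),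
      firstWin_cons_false (okcc _)]
    cases firstWin (c :: t) <;> simp

-- B's sliding-window loop computes firstWin: the window is always a nodup list
-- of at most 3 chars, the longest distinct run ending at the current position
lemma searchAltGo_eq : ∀ (rest w : List Char) (base : Int), w.Nodup → w.length ≤ 3 →
    searchAltGo (PySem.List.enumerate rest base) w =
      (firstWin (w ++ rest)).map (fun k => base - (w.length : Int) + (k : Int) + 4) := by
  intro rest
  induction rest with
  | nil =>
    intro w base hnd hlen
    rw [firstWin_short (by simpa using hlen)]
    rfl
  | cons c rest' ih =>
    intro w base hnd hlen
    rw [PySem.List.enumerate_cons]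
    by_cases hc : c ∈ w
    · -- duplicate: w = u ++ c :: v with c ∉ u; the window shrinks to v ++ [c]
      obtain ⟨j, hj⟩ : ∃ j, PySem.List.index? w c = some j :=
        Option.isSome_iff_exists.mp ((PySem.List.index?_isSome_iff w c).mpr hc)
      obtain ⟨u, v, rfl, hul, hcu⟩ := (PySem.List.index?_eq_some_iff _ _ _).mp hj
      have hcontains : (u ++ c :: v).contains c = true := List.contains_iff_mem.mpr hc
      have hcv : c ∉ v := by
        simp [List.nodup_append] at hnd; tauto
      have hvnd : v.Nodup := by
        simp [List.nodup_append] at hnd; tauto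
      have hslice : PySem.List.slice (u ++ c :: v)
          (some (((j : Nat) : Int) + 1)) none = v := by
        rw [show ((j : Nat) : Int) + 1 = (((j + 1 : Nat)) : Int) by push_cast; ring,
          PySem.List.slice_from _ (by positivity)]
        subst hul
        rw [show (((u.length + 1 : Nat)) : Int).toNat = (u ++ [c]).length by simp]
        rw [show u ++ c :: v = (u ++ [c]) ++ v by simp]
        exact List.drop_left
      have hlen2 : v.length + 1 ≤ 3 := by
        have := hlen; simp at this; omega
      simp only [searchAltGo, hcontains, if_true, hj, Option.getD_some, hslice]
      have hne4 : ¬ ((v ++ [c]).length = 4) := by simp; omega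
      simp only [hne4, if_false]
      rw [ih (v ++ [c]) (base + 1)
        (hvnd.append (List.nodup_singleton c) (by simpa [List.disjoint_singleton] using hcv))
        (by simpa using hlen2)]
      rw [show (v ++ [c]) ++ rest' = v ++ c :: rest' by simp]
      simp only [List.append_assoc, List.cons_append]
      rw [skipLem u v c rest' (by have := hlen; simp at this; omega)]
      cases firstWin (v ++ c :: rest') <;> simp
      ring
    · -- c not in the window: the window grows to w ++ [c]
      have hcontains : (w.contains c) = false := by
        simpa using hc
      simp only [searchAltGo, hcontains, Bool.false_eq_true, if_false]
      by_cases h3 : w.length = 3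
      · obtain ⟨a, b, d, rfl⟩ := List.length_eq_three.mp h3
        have hok : ok4 (a :: b :: d :: c :: rest') = true := by
          simp [List.nodup_cons] at hnd
          simp_all [ok4]; tauto
        simp only [show ([a,b,d] ++ [c]).length = 4 by rfl, if_true]
        simp [firstWin, hok]
        omega
      · have hlt : w.length ≤ 2 := by omega
        have hne4 : ¬ ((w ++ [c]).length = 4) := by simp; omega
        simp only [hne4, if_false]
        rw [ih (w ++ [c]) (base + 1)
          (hnd.append (List.nodup_singleton c) (by simpa [List.disjoint_singleton] using hc))
          (by simp; omega)]
        rw [show (w ++ [c]) ++ rest' = w ++ c :: rest' by simp]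
        cases firstWin (w ++ c :: rest') <;> simp

-- ===== VERDICT (by name: the statement is the Claim_ definition above) =====
theorem search_spec : Claim_equal_search := by
  intro s _
  unfold Spec_search search search_alt
  have hA := searchGo_eq s s.toList.length 0 (by omega)
  have hB := searchAltGo_eq s.toList [] 0 (by simp) (by simp)
  simp only [Nat.cast_zero] at hA
  rw [hA, hB]
  simp only [List.drop_zero, List.nil_append]
  cases firstWin s.toList <;> simp
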